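-- pv_equiv track=rewrite | github.com/nyxssmith/jenkinsTests | fontio3/fontio3/utilities/__init__.py | cumulCount
-- ===== SOURCE A (Python) =====
-- def cumulCount(iterable, wantEndIndices=False, addExtraValue=False, adjustment=0):
--     """
--     Given an iterable whose items are integers representing lengths of some
--     sequence, returns a list with cumulative counts. The process is controlled
--     by these arguments:
--
--         addExtraValue       If True, an extra value will be added at one end of
--                             the returned list. This will be the first unused
--                             index at the end if wantEndIndices is False; or a
--                             fixed value of -1 at the front if wantEndIndices is
--                             True.
--
--         adjustment          A constant value to be added to all numbers in the
--                             returned list. Useful for getting 1-based indices,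
--                             Default is zero.
--
--         wantEndIndices      If True, the values returned will be the indices of
--                             the last member of each subitem from the iterable;
--                             if False, the indices of the first member are used.
--                             Default is False.
--
--     >>> v = [4, 2, 6, 9]
--     >>> cumulCount(v)
--     [0, 4, 6, 12]
--     >>> cumulCount(v, wantEndIndices=True)
--     [3, 5, 11, 20]
--     >>> cumulCount(v, adjustment=1)
--     [1, 5, 7, 13]
--     >>> cumulCount(v, wantEndIndices=True, adjustment=1)
--     [4, 6, 12, 21]
--     >>> cumulCount(v, addExtraValue=True)
--     [0, 4, 6, 12, 21]
--     >>> cumulCount(v, wantEndIndices=True, addExtraValue=True)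
--     [-1, 3, 5, 11, 20]
--     """
--
--     r = []
--
--     if wantEndIndices:
--         n = adjustment - 1
--
--         if addExtraValue:
--             r.append(n)
--
--         for thisLen in iterable:
--             n += thisLen
--             r.append(n)
--
--     else:
--         n = adjustment
--
--         for thisLen in iterable:
--             r.append(n)
--             n += thisLen
--
--         if addExtraValue:
--             r.append(n)
--
--     return r
-- ===== SOURCE B (Python) =====
-- from itertools import accumulate
--
-- def cumulCount(iterable, wantEndIndices=False, addExtraValue=False, adjustment=0):
--     lens = list(iterable)
--     totals = list(accumulate(lens))  # inclusive cumulative sums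
--     if wantEndIndices:
--         out = [adjustment - 1 + t for t in totals]
--         if addExtraValue:
--             out.insert(0, adjustment - 1)
--     else:
--         starts = [0] + totals
--         out = [adjustment + s for s in (starts if addExtraValue else starts[:len(lens)])]
--     return out
-- ===== Notes on version B (the rewrite author's own statement) =====
-- stated objective: idiomatic
-- what changed: B materializes the lengths, builds the full inclusive cumulative-sum table once with itertools.accumulate, and then reshapes it in a separate comprehension pass (shift/offset and optional sentinel), replacing A's interleaved append-and-accumulate loop with branch-dependent ordering.
import Mathlib
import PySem

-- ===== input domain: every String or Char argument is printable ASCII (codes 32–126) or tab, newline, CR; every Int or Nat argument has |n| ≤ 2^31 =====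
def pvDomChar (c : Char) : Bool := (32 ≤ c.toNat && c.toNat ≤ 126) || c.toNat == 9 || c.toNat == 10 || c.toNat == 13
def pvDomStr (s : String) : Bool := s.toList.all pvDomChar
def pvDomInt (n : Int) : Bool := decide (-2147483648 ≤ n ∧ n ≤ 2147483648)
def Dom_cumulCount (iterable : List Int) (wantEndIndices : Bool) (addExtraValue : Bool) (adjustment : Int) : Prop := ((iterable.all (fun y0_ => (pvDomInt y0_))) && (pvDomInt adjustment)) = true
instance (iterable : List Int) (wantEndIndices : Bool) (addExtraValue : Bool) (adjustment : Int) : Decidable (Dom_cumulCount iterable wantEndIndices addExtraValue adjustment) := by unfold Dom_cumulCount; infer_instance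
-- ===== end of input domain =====

-- B builds the inclusive cumulative-sum table once (itertools.accumulate) and reshapes it in a
-- separate pass, replacing A's interleaved append-and-accumulate loop; objective: idiomatic.
-- ===== PORT A =====
-- literal port of A: interleaved loop, accumulating n and appending as it goes
def cumulCount (iterable : List Int) (wantEndIndices : Bool) (addExtraValue : Bool) (adjustment : Int) : List Int :=
  if wantEndIndices then
    let n := adjustment - 1
    let r : List Int := if addExtraValue then [n] else []
    let st := iterable.foldl (fun (st : Int × List Int) thisLen =>
      (st.1 + thisLen, st.2 ++ [st.1 + thisLen])) (n, r)
    st.2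
  else
    let st := iterable.foldl (fun (st : Int × List Int) thisLen =>
      (st.1 + thisLen, st.2 ++ [st.1])) (adjustment, ([] : List Int))
    if addExtraValue then st.2 ++ [st.1] else st.2

-- ===== PORT B =====
-- itertools.accumulate over the lengths (inclusive running sums)
def pvAccum : List Int → Int → List Int
  | [], _ => []
  | x :: xs, acc => (acc + x) :: pvAccum xs (acc + x)

-- port of B: build the accumulate table once, then reshape it
def cumulCount_alt (iterable : List Int) (wantEndIndices : Bool) (addExtraValue : Bool) (adjustment : Int) : List Int :=
  let totals := pvAccum iterable 0
  if wantEndIndices then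
    let out := totals.map (fun t => adjustment - 1 + t)
    if addExtraValue then (adjustment - 1) :: out else out
  else
    let starts := 0 :: totals
    -- starts[:len(lens)] with a nonnegative bound = List.take (exact)
    (if addExtraValue then starts else starts.take iterable.length).map
      (fun s => adjustment + s)


-- ===== PRECONDITION & SPEC =====
def Spec_cumulCount (iterable : List Int) (wantEndIndices : Bool) (addExtraValue : Bool) (adjustment : Int) (out : List Int) : Prop := out = cumulCount_alt iterable wantEndIndices addExtraValue adjustment
instance (iterable : List Int) (wantEndIndices : Bool) (addExtraValue : Bool) (adjustment : Int) (out : List Int) : Decidable (Spec_cumulCount iterable wantEndIndices addExtraValue adjustment out) := by unfold Spec_cumulCount; infer_instance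

-- ===== CLAIM (what is proved, stated in full; the proofs are below) =====
def Claim_equal_cumulCount : Prop := ∀ (iterable : List Int) (wantEndIndices : Bool) (addExtraValue : Bool) (adjustment : Int), Dom_cumulCount iterable wantEndIndices addExtraValue adjustment → Spec_cumulCount iterable wantEndIndices addExtraValue adjustment (cumulCount iterable wantEndIndices addExtraValue adjustment)

-- ===== LEMMAS AND PROOFS =====

-- pvAccum with a shifted accumulator is a shifted table
theorem pvAccum_shift (xs : List Int) (c d : Int) :
    pvAccum xs (c + d) = (pvAccum xs d).map (fun t => c + t) := by
  induction xs generalizing d with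
  | nil => simp [pvAccum]
  | cons x xs ih =>
      simp only [pvAccum, List.map_cons]
      rw [show c + d + x = c + (d + x) by ring, ih (d + x)]

theorem pvAccum_shift0 (xs : List Int) (c : Int) :
    pvAccum xs c = (pvAccum xs 0).map (fun t => c + t) := by
  have := pvAccum_shift xs c 0
  rwa [Int.add_zero] at this

theorem cons_accum (x : Int) (xs : List Int) :
    x :: pvAccum xs x = ((0 : Int) :: pvAccum xs 0).map (fun t => x + t) := by
  simp [pvAccum_shift0 xs x]

-- A's end-indices loop produces the shifted accumulate table
theorem foldl_end (xs : List Int) (n : Int) (r : List Int) :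
    (xs.foldl (fun (st : Int × List Int) thisLen =>
      (st.1 + thisLen, st.2 ++ [st.1 + thisLen])) (n, r)).2
      = r ++ (pvAccum xs 0).map (fun t => n + t) := by
  induction xs generalizing n r with
  | nil => simp [pvAccum]
  | cons x xs ih =>
      simp only [List.foldl_cons, pvAccum, List.map_cons, Int.zero_add]
      rw [ih]
      rw [pvAccum_shift0 xs x, List.map_map]
      simp [Int.add_assoc]

-- A's start-indices loop: final accumulator and the emitted exclusive prefixes
theorem foldl_start (xs : List Int) (n : Int) (r : List Int) :
    xs.foldl (fun (st : Int × List Int) thisLen =>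
      (st.1 + thisLen, st.2 ++ [st.1])) (n, r)
      = (n + xs.sum,
         r ++ ((0 :: pvAccum xs 0).take xs.length).map (fun s => n + s)) := by
  induction xs generalizing n r with
  | nil => simp
  | cons x xs ih =>
      simp only [List.foldl_cons, List.length_cons, pvAccum, Int.zero_add, List.sum_cons]
      rw [ih]
      simp only [Prod.mk.injEq]
      refine ⟨by ring, ?_⟩
      simp only [List.take_succ_cons, List.map_cons, List.append_assoc,
        List.singleton_append, Int.add_zero]
      congr 1
      conv_rhs => rw [cons_accum, ← List.map_take, List.map_map]
      congr 1
      exact List.map_congr_left (fun a _ => by simp only [Function.comp_apply]; ring)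

-- the full starts table splits into its exclusive prefixes plus the total
theorem starts_split (xs : List Int) :
    (0 : Int) :: pvAccum xs 0 = ((0 :: pvAccum xs 0).take xs.length) ++ [xs.sum] := by
  induction xs with
  | nil => simp [pvAccum]
  | cons x xs ih =>
      simp only [pvAccum, List.length_cons, List.take_succ_cons, Int.zero_add,
        List.sum_cons, List.cons_append]
      congr 1
      rw [cons_accum]
      conv_lhs => rw [ih]
      rw [← List.map_take]
      simp

-- ===== VERDICT (by name: the statement is the Claim_ definition above) =====
theorem cumulCount_spec : Claim_equal_cumulCount := by
  unfold Claim_equal_cumulCount Spec_cumulCount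
  intro it w a adj _
  cases w with
  | true =>
      cases a <;> simp [cumulCount, cumulCount_alt, foldl_end]
  | false =>
      cases a with
      | false => simp [cumulCount, cumulCount_alt, foldl_start]
      | true =>
          simp only [cumulCount, cumulCount_alt, foldl_start, Bool.false_eq_true,
            if_true, if_false, List.nil_append]
          conv_rhs => rw [starts_split]
          simp
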